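-- pv_equiv track=rewrite | github.com/BrooksResearchGroup-UM/crimm | ICBuilder.py | recur_find_build_seq
-- ===== SOURCE A (Python) =====
-- from collections import OrderedDict
--
-- def recur_find_build_seq(
--     running_dict: OrderedDict, missing_atoms, build_seq, exclude_list
-- ):
--
--     if len(missing_atoms) == 0:
--         return build_seq
--
--     atom_name, ic_list = running_dict.popitem(last=False)
--     for ic_keys in ic_list:
--         cur_ic_set = set(ic_keys)
--         if (len(cur_ic_set.intersection(missing_atoms)) > 1) or (
--             cur_ic_set.intersection(exclude_list)
--         ):
--             continue
--
--         missing_atoms.remove(atom_name)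
--         build_seq.append((atom_name, ic_keys))
--         return recur_find_build_seq(
--             running_dict, missing_atoms, build_seq, exclude_list
--         )
--
--     running_dict[atom_name] = ic_list
--     return recur_find_build_seq(
--         running_dict, missing_atoms, build_seq, exclude_list
--     )
-- ===== SOURCE B (Python) =====
-- def first_buildable(ic_list, missing, excl):
--     for ic_keys in ic_list:
--         s = set(ic_keys)
--         if len(s & missing) <= 1 and not (s & excl):
--             return ic_keys
--     return None
--
--
-- def recur_find_build_seq(running_dict, missing_atoms, build_seq, exclude_list):
--     excl = set(exclude_list)
--     pending = list(running_dict.items())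
--     while missing_atoms:
--         still_waiting = []
--         progressed = False
--         for atom_name, ic_list in pending:
--             if not missing_atoms:
--                 break
--             ic_keys = first_buildable(ic_list, set(missing_atoms), excl)
--             if ic_keys is None:
--                 still_waiting.append((atom_name, ic_list))
--             else:
--                 missing_atoms.remove(atom_name)
--                 build_seq.append((atom_name, ic_keys))
--                 progressed = True
--         if missing_atoms and not progressed:
--             raise RuntimeError(
--                 "cannot build remaining atoms: " + ", ".join(missing_atoms)
--             )
--         pending = still_waiting
--     return build_seq
-- ===== Notes on version B (the rewrite author's own statement) =====
-- stated objective: alternative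
-- what changed: Replaces A's tail recursion over a mutated OrderedDict (pop front, reinsert failures at the back) with an iterative worklist of repeated in-order passes over a pending list, building every currently-buildable atom per pass and carrying the unbuilt ones to the next pass.
import Mathlib
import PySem

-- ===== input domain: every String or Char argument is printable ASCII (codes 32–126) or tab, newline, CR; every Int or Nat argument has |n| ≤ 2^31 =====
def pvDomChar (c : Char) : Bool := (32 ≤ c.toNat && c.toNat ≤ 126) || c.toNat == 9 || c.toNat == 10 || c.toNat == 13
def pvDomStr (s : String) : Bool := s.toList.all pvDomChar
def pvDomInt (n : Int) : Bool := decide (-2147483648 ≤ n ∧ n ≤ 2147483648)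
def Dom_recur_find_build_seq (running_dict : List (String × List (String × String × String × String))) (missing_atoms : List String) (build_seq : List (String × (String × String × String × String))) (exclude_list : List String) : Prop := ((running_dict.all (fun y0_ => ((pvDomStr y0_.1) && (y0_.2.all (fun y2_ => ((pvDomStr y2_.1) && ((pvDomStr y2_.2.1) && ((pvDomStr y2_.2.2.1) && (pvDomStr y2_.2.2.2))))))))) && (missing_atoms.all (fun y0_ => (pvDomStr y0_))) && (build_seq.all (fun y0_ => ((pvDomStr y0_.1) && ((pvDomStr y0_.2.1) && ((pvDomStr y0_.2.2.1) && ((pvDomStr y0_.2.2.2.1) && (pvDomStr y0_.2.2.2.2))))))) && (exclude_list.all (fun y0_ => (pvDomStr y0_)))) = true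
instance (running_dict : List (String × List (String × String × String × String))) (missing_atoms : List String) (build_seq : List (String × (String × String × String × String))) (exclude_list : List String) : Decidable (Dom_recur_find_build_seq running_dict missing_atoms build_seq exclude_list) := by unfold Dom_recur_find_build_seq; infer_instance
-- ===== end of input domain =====

-- B replaces A's tail recursion over a mutated OrderedDict by iterated in-order passes over a
-- pending list ("alternative" decomposition); equivalence is about the RETURN value: A consumes
-- running_dict in place while B leaves it untouched (both mutate missing_atoms/build_seq alike).

abbrev pvIC : Type := String × String × String × String
abbrev pvEntry : Type := String × List pvIC
abbrev pvOut : Type := String × pvIC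

-- ===== PORT A =====
-- set(ic_keys) of the 4-tuple, as Python builds it
def pvSet4 (ic : pvIC) : PySem.Set String :=
  PySem.Set.ofList [ic.1, ic.2.1, ic.2.2.1, ic.2.2.2]

-- the 'for ic_keys in ic_list' scan with its continue / first-hit return
def pvA_scan : List pvIC → List String → List String → Option pvIC
  | [], _, _ => none
  | ic :: rest, missing, excl =>
    if ((PySem.Set.inter (pvSet4 ic) missing).length > 1) ||
       !((PySem.Set.inter (pvSet4 ic) excl).isEmpty) then
      pvA_scan rest missing excl
    else some ic

-- A's tail recursion; queue = running_dict in insertion order, reinsertion at the end.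
-- Fuel only makes the recursion structural; it is proved sufficient on Pre_ inputs
-- ([] on exhaustion / empty popitem / failed remove are A's excluded exception paths).
def pvA_loop : Nat → List pvEntry → List String → List pvOut → List String → List pvOut
  | 0, _, _, seq, _ => seq
  | fa + 1, q, missing, seq, excl =>
    if missing.length = 0 then seq
    else
      match q with
      | [] => seq  -- popitem on empty dict: KeyError, outside Pre_
      | (name, icl) :: rest =>
        match pvA_scan icl missing excl with
        | some ic =>
          match PySem.List.remove? missing name with
          | some missing' => pvA_loop fa rest missing' (seq ++ [(name, ic)]) excl
          | none => seq  -- missing_atoms.remove: ValueError, outside Pre_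
        | none => pvA_loop fa (rest ++ [(name, icl)]) missing seq excl

def recur_find_build_seq (running_dict : List (String × List (String × String × String × String))) (missing_atoms : List String) (build_seq : List (String × (String × String × String × String))) (exclude_list : List String) : List (String × (String × String × String × String)) :=
  pvA_loop ((missing_atoms.length + 1) * (running_dict.length + 1) + 1) running_dict missing_atoms build_seq exclude_list

-- ===== PORT B =====
-- B's per-atom test (first_buildable in Source B)
def pvOk (ic : pvIC) (missing excl : List String) : Bool :=
  decide ((PySem.Set.inter (pvSet4 ic) missing).length ≤ 1) &&
  (PySem.Set.inter (pvSet4 ic) excl).isEmpty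

def pvB_first (icl : List pvIC) (missing excl : List String) : Option pvIC :=
  icl.find? (fun ic => pvOk ic missing excl)

-- one pass of B's inner for-loop: returns (still_waiting, missing', build_seq', progressed)
def pvB_pass : List pvEntry → List String → List pvOut → List String →
    (List pvEntry × List String × List pvOut × Bool)
  | [], missing, seq, _ => ([], missing, seq, false)
  | (name, icl) :: rest, missing, seq, excl =>
    if missing.isEmpty then ([], missing, seq, false)  -- the 'break'
    else
      match pvB_first icl missing excl with
      | some ic =>
        let r := pvB_pass rest ((PySem.List.remove? missing name).getD missing)
                   (seq ++ [(name, ic)]) excl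
        (r.1, r.2.1, r.2.2.1, true)
      | none =>
        let r := pvB_pass rest missing seq excl
        ((name, icl) :: r.1, r.2.1, r.2.2.1, r.2.2.2)

-- B's while-loop; fuel missing.length + 1 (each kept pass makes progress on Pre_ inputs)
def pvB_loop : Nat → List pvEntry → List String → List pvOut → List String → List pvOut
  | 0, _, _, seq, _ => seq
  | fb + 1, pending, missing, seq, excl =>
    if missing.isEmpty then seq
    else
      let r := pvB_pass pending missing seq excl
      if !r.2.1.isEmpty && !r.2.2.2 then r.2.2.1  -- Source B raises RuntimeError here, outside Pre_
      else pvB_loop fb r.1 r.2.1 r.2.2.1 excl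

def recur_find_build_seq_alt (running_dict : List (String × List (String × String × String × String))) (missing_atoms : List String) (build_seq : List (String × (String × String × String × String))) (exclude_list : List String) : List (String × (String × String × String × String)) :=
  pvB_loop (missing_atoms.length + 1) running_dict missing_atoms build_seq exclude_list

-- ===== PRECONDITION & SPEC =====
-- Pre_ excludes the inputs on which A raises or recurses forever (KeyError from popitem,
-- ValueError from missing_atoms.remove, or an unbuildable residual set), i.e. it admits
-- missing_atoms = [] and otherwise requires duplicate-free keys equal (as a set) to
-- missing_atoms — extra or duplicate dict keys can make A raise depending on pop order, and a
-- duplicate-key association list does not denote an OrderedDict — together with the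
-- fixpoint condition that every nonempty subset of missing_atoms contains a buildable atom
-- (exactly the inputs on which A's recursion reaches missing_atoms = [] and returns).
def Pre_recur_find_build_seq (running_dict : List (String × List (String × String × String × String))) (missing_atoms : List String) (build_seq : List (String × (String × String × String × String))) (exclude_list : List String) : Prop :=
  missing_atoms = [] ∨
  (missing_atoms.Nodup ∧ (running_dict.map Prod.fst).Nodup ∧
   (∀ k ∈ running_dict.map Prod.fst, k ∈ missing_atoms) ∧
   (∀ m ∈ missing_atoms, m ∈ running_dict.map Prod.fst) ∧
   (∀ S ∈ missing_atoms.sublists, S ≠ [] →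
      ∃ p ∈ running_dict, p.1 ∈ S ∧ p.2.any (fun ic => pvOk ic S exclude_list) = true))
instance (running_dict : List (String × List (String × String × String × String))) (missing_atoms : List String) (build_seq : List (String × (String × String × String × String))) (exclude_list : List String) : Decidable (Pre_recur_find_build_seq running_dict missing_atoms build_seq exclude_list) := by unfold Pre_recur_find_build_seq; infer_instance

def pvWitness_recur_find_build_seq : (List (String × List (String × String × String × String))) × List String × (List (String × (String × String × String × String))) × List String :=
  ([("N", [("C", "CA", "HA", "HN")])], ["N"], [], ["X"])

def Spec_recur_find_build_seq (running_dict : List (String × List (String × String × String × String))) (missing_atoms : List String) (build_seq : List (String × (String × String × String × String))) (exclude_list : List String) (out : List (String × (String × String × String × String))) : Prop := out = recur_find_build_seq_alt running_dict missing_atoms build_seq exclude_list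
instance (running_dict : List (String × List (String × String × String × String))) (missing_atoms : List String) (build_seq : List (String × (String × String × String × String))) (exclude_list : List String) (out : List (String × (String × String × String × String))) : Decidable (Spec_recur_find_build_seq running_dict missing_atoms build_seq exclude_list out) := by unfold Spec_recur_find_build_seq; infer_instance

-- ===== CLAIM (what is proved, stated in full; the proofs are below) =====
def Claim_equal_recur_find_build_seq : Prop := ∀ (running_dict : List (String × List (String × String × String × String))) (missing_atoms : List String) (build_seq : List (String × (String × String × String × String))) (exclude_list : List String), Dom_recur_find_build_seq running_dict missing_atoms build_seq exclude_list → Pre_recur_find_build_seq running_dict missing_atoms build_seq exclude_list → Spec_recur_find_build_seq running_dict missing_atoms build_seq exclude_list (recur_find_build_seq running_dict missing_atoms build_seq exclude_list)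

-- ===== LEMMAS AND PROOFS =====

-- whether an entry currently has a usable ic tuple
def pvHas (p : pvEntry) (missing excl : List String) : Bool :=
  p.2.any (fun ic => pvOk ic missing excl)

-- index of the first currently-buildable entry of the queue
def pvIdx (q : List pvEntry) (missing excl : List String) : Nat :=
  q.findIdx (fun p => pvHas p missing excl)

-- the run invariant: missing and the queue keys are duplicate-free with the same members,
-- and every nonempty subset of missing has a buildable member in the queue
def pvINV (excl : List String) (q : List pvEntry) (missing : List String) : Prop :=
  missing.Nodup ∧ (q.map Prod.fst).Nodup ∧
  (∀ a, a ∈ q.map Prod.fst ↔ a ∈ missing) ∧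
  (∀ S : List String, S ≠ [] → (∀ x ∈ S, x ∈ missing) →
     ∃ p ∈ q, p.1 ∈ S ∧ pvHas p S excl = true)

-- B's continuation from the middle of a pass
def pvStitch (fb : Nat) (cur sw : List pvEntry) (missing : List String) (seq : List pvOut)
    (excl : List String) (prog0 : Bool) : List pvOut :=
  let r := pvB_pass cur missing seq excl
  if !r.2.1.isEmpty && !(prog0 || r.2.2.2) then r.2.2.1
  else pvB_loop fb (sw ++ r.1) r.2.1 r.2.2.1 excl

theorem pvA_scan_eq_find? (icl : List pvIC) (missing excl : List String) :
    pvA_scan icl missing excl = pvB_first icl missing excl := by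
  induction icl with
  | nil => rfl
  | cons ic rest ih =>
    simp only [pvA_scan, pvB_first, List.find?]
    by_cases h1 : (PySem.Set.inter (pvSet4 ic) missing).length ≤ 1
    · by_cases h2 : (PySem.Set.inter (pvSet4 ic) excl).isEmpty = true
      · simp [pvOk, h1, h2, Nat.not_lt.mpr h1]
      · simpa [pvOk, h1, h2, Nat.not_lt.mpr h1] using ih
    · simpa [pvOk, h1, Nat.lt_of_not_le h1] using ih

theorem pvA_loop_nilM (fa : Nat) (q : List pvEntry) (seq : List pvOut) (excl : List String) :
    pvA_loop fa q [] seq excl = seq := by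
  cases fa <;> simp [pvA_loop]

theorem pvB_loop_nilM (fb : Nat) (q : List pvEntry) (seq : List pvOut) (excl : List String) :
    pvB_loop fb q [] seq excl = seq := by
  cases fb <;> simp [pvB_loop]

theorem pvStitch_nilM (fb : Nat) (cur sw : List pvEntry) (seq : List pvOut)
    (excl : List String) (prog0 : Bool) :
    pvStitch fb cur sw [] seq excl prog0 = seq := by
  cases cur <;> simp [pvStitch, pvB_pass, pvB_loop_nilM]

theorem pvINV_len (excl : List String) (q : List pvEntry) (missing : List String)
    (h : pvINV excl q missing) : q.length = missing.length := by
  obtain ⟨h1, h2, h3, -⟩ := h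
  have : (q.map Prod.fst).Perm missing := (List.perm_ext_iff_of_nodup h2 h1).mpr h3
  simpa using this.length_eq

theorem pvINV_rotate (excl : List String) (h : pvEntry) (t : List pvEntry)
    (missing : List String) (hinv : pvINV excl (h :: t) missing) :
    pvINV excl (t ++ [h]) missing := by
  obtain ⟨h1, h2, h3, h4⟩ := hinv
  have hperm : ((h :: t).map Prod.fst).Perm ((t ++ [h]).map Prod.fst) := by
    simpa using (List.perm_append_singleton h.1 (t.map Prod.fst)).symm
  refine ⟨h1, hperm.nodup h2, ?_, ?_⟩
  · intro a; rw [← h3 a]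
    exact ⟨fun ha => hperm.mem_iff.mpr ha |> fun x => (hperm.mem_iff).mpr ha, fun ha => hperm.mem_iff.mp ha⟩
  · intro S hS hsub
    obtain ⟨p, hp, hp1, hp2⟩ := h4 S hS hsub
    refine ⟨p, ?_, hp1, hp2⟩
    rcases List.mem_cons.mp hp with rfl | hp'
    · simp
    · exact List.mem_append_left _ hp'

theorem pvINV_erase (excl : List String) (name : String) (icl : List pvIC)
    (t : List pvEntry) (missing : List String)
    (hinv : pvINV excl ((name, icl) :: t) missing) :
    name ∈ missing ∧ pvINV excl t (missing.erase name) := by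
  obtain ⟨h1, h2, h3, h4⟩ := hinv
  have hcons : ((name, icl) :: t).map Prod.fst = name :: t.map Prod.fst := rfl
  rw [hcons, List.nodup_cons] at h2
  obtain ⟨hnott, h2t⟩ := h2
  have hname : name ∈ missing := (h3 name).mp (by simp [hcons])
  refine ⟨hname, h1.erase name, h2t, ?_, ?_⟩
  · intro a
    rw [h1.mem_erase_iff]
    constructor
    · intro ha
      refine ⟨fun he => hnott (he ▸ ha), (h3 a).mp ?_⟩
      rw [hcons]; exact List.mem_cons_of_mem _ ha
    · rintro ⟨hne, ha⟩
      have := (h3 a).mpr ha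
      rw [hcons] at this
      rcases List.mem_cons.mp this with h | h
      · exact absurd h hne
      · exact h
  · intro S hS hsub
    have hsub' : ∀ x ∈ S, x ∈ missing := fun x hx => (h1.mem_erase_iff.mp (hsub x hx)).2
    obtain ⟨p, hp, hp1, hp2⟩ := h4 S hS hsub'
    have hpne : p.1 ≠ name := by
      intro he
      exact (h1.mem_erase_iff.mp (hsub p.1 hp1)).1 he
    refine ⟨p, ?_, hp1, hp2⟩
    rcases List.mem_cons.mp hp with h | h
    · exact absurd (by rw [h]) hpne
    · exact h

theorem pvOk_congr (ic : pvIC) (S S' excl : List String) (h : ∀ x, x ∈ S ↔ x ∈ S') :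
    pvOk ic S excl = pvOk ic S' excl := by
  unfold pvOk PySem.Set.inter
  have hf : List.filter (fun x => PySem.Set.contains S x) (pvSet4 ic)
      = List.filter (fun x => PySem.Set.contains S' x) (pvSet4 ic) := by
    refine List.filter_congr (fun y _ => ?_)
    show S.contains y = S'.contains y
    rcases Bool.eq_false_or_eq_true (S.contains y) with hb | hb <;>
      rcases Bool.eq_false_or_eq_true (S'.contains y) with hb' | hb' <;>
        simp_all [h y]
  rw [hf]

theorem pvHas_congr (p : pvEntry) (S S' excl : List String) (h : ∀ x, x ∈ S ↔ x ∈ S') :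
    pvHas p S excl = pvHas p S' excl := by
  unfold pvHas
  congr 1
  funext ic
  exact pvOk_congr ic S S' excl h

-- a failed head scan means the head entry is not currently buildable
theorem pvHas_false_of_first_none (name : String) (icl : List pvIC)
    (missing excl : List String) (h : pvB_first icl missing excl = none) :
    pvHas (name, icl) missing excl = false := by
  rw [pvHas, List.any_eq_false]
  exact fun ic hic => List.find?_eq_none.mp h ic hic

-- some entry of the queue is currently buildable
theorem pvExists_buildable (excl : List String) (q : List pvEntry) (missing : List String)
    (hinv : pvINV excl q missing) (hM : missing ≠ []) :
    ∃ p ∈ q, pvHas p missing excl = true := by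
  obtain ⟨p, hp, -, hp2⟩ := hinv.2.2.2 missing hM (fun x hx => hx)
  exact ⟨p, hp, hp2⟩

-- B: a failed atom moves from the pass to still_waiting
theorem pvStitch_fail (fb : Nat) (name : String) (icl : List pvIC) (cur sw : List pvEntry)
    (missing : List String) (seq : List pvOut) (excl : List String) (prog0 : Bool)
    (hM : missing ≠ []) (hscan : pvB_first icl missing excl = none) :
    pvStitch fb ((name, icl) :: cur) sw missing seq excl prog0
      = pvStitch fb cur (sw ++ [(name, icl)]) missing seq excl prog0 := by
  simp [pvStitch, pvB_pass, hscan, List.isEmpty_iff, hM]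

-- B: a successful atom is built and the pass continues
theorem pvStitch_succ (fb : Nat) (name : String) (icl : List pvIC) (ic : pvIC)
    (cur sw : List pvEntry) (missing : List String) (seq : List pvOut) (excl : List String)
    (prog0 : Bool) (hM : missing ≠ []) (hscan : pvB_first icl missing excl = some ic) :
    pvStitch fb ((name, icl) :: cur) sw missing seq excl prog0
      = pvStitch fb cur sw ((PySem.List.remove? missing name).getD missing)
          (seq ++ [(name, ic)]) excl true := by
  simp [pvStitch, pvB_pass, hscan, List.isEmpty_iff, hM]

-- entering a fresh pass
theorem pvB_loop_succ_stitch (fb : Nat) (pending : List pvEntry) (missing : List String)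
    (seq : List pvOut) (excl : List String) (hM : missing ≠ []) :
    pvB_loop (fb + 1) pending missing seq excl = pvStitch fb pending [] missing seq excl false := by
  simp [pvB_loop, pvStitch, List.isEmpty_iff, hM]

-- B: restarting a pass
theorem pvStitch_restart (fb : Nat) (sw : List pvEntry) (missing : List String)
    (seq : List pvOut) (excl : List String) (hM : missing ≠ []) :
    pvStitch (fb + 1) [] sw missing seq excl true
      = pvStitch fb sw [] missing seq excl false := by
  rw [pvStitch]
  simp only [pvB_pass, Bool.or_false, Bool.not_true, Bool.and_false]
  rw [if_neg (by simp), List.append_nil, pvB_loop_succ_stitch _ _ _ _ _ hM]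

-- the main simulation lemma: A's run from queue cur ++ sw equals B's run from the middle of
-- a pass (cur left in the pass, sw already set aside, prog0 = progress so far)
theorem pvMain (m : Nat) : ∀ (fa fb : Nat) (cur sw : List pvEntry) (missing : List String)
    (seq : List pvOut) (excl : List String) (prog0 : Bool) (L0 : Nat),
    2 * fa + (if cur = [] then 1 else 0) ≤ m →
    pvINV excl (cur ++ sw) missing →
    (prog0 = false → ∀ p ∈ sw, pvHas p missing excl = false) →
    cur.length + sw.length ≤ L0 →
    (missing ≠ [] → missing.length * L0 + pvIdx (cur ++ sw) missing excl + 2 ≤ fa) →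
    (missing ≠ [] → missing.length + (if prog0 then 1 else 0) ≤ fb) →
    pvA_loop fa (cur ++ sw) missing seq excl = pvStitch fb cur sw missing seq excl prog0 := by
  induction m with
  | zero =>
    intro fa fb cur sw missing seq excl prog0 L0 hm hinv hsw hlen hfa hfb
    by_cases hM : missing = []
    · subst hM; rw [pvA_loop_nilM, pvStitch_nilM]
    · exfalso
      have h1 := hfa hM
      have h2 : 2 * fa ≤ 0 := le_trans (Nat.le_add_right _ _) hm
      omega
  | succ m ih =>
    intro fa fb cur sw missing seq excl prog0 L0 hm hinv hsw hlen hfa hfb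
    by_cases hM : missing = []
    · subst hM; rw [pvA_loop_nilM, pvStitch_nilM]
    have hfa' := hfa hM
    have hfb' := hfb hM
    have hMlen : ¬ missing.length = 0 := by
      simpa [List.length_eq_zero_iff] using hM
    obtain ⟨fa', rfl⟩ : ∃ fa', fa = fa' + 1 := ⟨fa - 1, by omega⟩
    match cur with
    | [] =>
      -- end of a pass: B restarts with still_waiting, A's queue is unchanged
      have hswne : sw ≠ [] := by
        intro h
        have := pvINV_len excl ([] ++ sw) missing hinv
        simp [h] at this
        exact hM (List.length_eq_zero_iff.mp this.symm)
      have hprog : prog0 = true := by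
        by_contra h
        have h0 : prog0 = false := by simpa using h
        obtain ⟨p, hp, hp2⟩ := pvExists_buildable excl ([] ++ sw) missing hinv hM
        rw [List.nil_append] at hp
        rw [hsw h0 p hp] at hp2
        cases hp2
      subst hprog
      have hm' : 2 * (fa' + 1) + 1 ≤ m + 1 := by simpa using hm
      have hfb'' : missing.length + 1 ≤ fb := by simpa using hfb'
      obtain ⟨fb', rfl⟩ : ∃ fb', fb = fb' + 1 := ⟨fb - 1, by omega⟩
      rw [pvStitch_restart _ _ _ _ _ hM]
      have := ih (fa' + 1) fb' sw [] missing seq excl false L0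
        (by rw [if_neg hswne]; omega)
        (by rwa [List.append_nil, ← List.nil_append sw])
        (fun _ p hp => absurd hp (List.not_mem_nil))
        (by simpa using hlen)
        (by intro h; rw [List.append_nil]; simpa using hfa h)
        (fun _ => by simp only [if_neg (by simp : ¬ false = true)]; omega)
      rwa [List.append_nil] at this
    | (name, icl) :: rest =>
      have hq : ((name, icl) :: rest) ++ sw = (name, icl) :: (rest ++ sw) := rfl
      have hm' : 2 * (fa' + 1) ≤ m + 1 := le_trans (Nat.le_add_right _ _) hm
      rcases hscan : pvB_first icl missing excl with _ | ic
      · -- head not buildable: A reinserts it at the back, B sets it aside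
        have hhead : pvHas (name, icl) missing excl = false :=
          pvHas_false_of_first_none name icl missing excl hscan
        have hstep : pvA_loop (fa' + 1) (((name, icl) :: rest) ++ sw) missing seq excl
            = pvA_loop fa' ((rest ++ sw) ++ [(name, icl)]) missing seq excl := by
          rw [hq]
          simp only [pvA_loop, if_neg hMlen, pvA_scan_eq_find?, hscan]
        have hex : ∃ p ∈ rest ++ sw, pvHas p missing excl = true := by
          obtain ⟨p, hp, hp2⟩ := pvExists_buildable excl _ missing hinv hM
          rw [hq] at hp
          rcases List.mem_cons.mp hp with rfl | hp'
          · rw [hhead] at hp2; cases hp2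
          · exact ⟨p, hp', hp2⟩
        have hidx_cons : pvIdx ((name, icl) :: (rest ++ sw)) missing excl
            = pvIdx (rest ++ sw) missing excl + 1 := by
          simp [pvIdx, List.findIdx_cons, hhead]
        have hlt : List.findIdx (fun p => pvHas p missing excl) (rest ++ sw)
            < (rest ++ sw).length := List.findIdx_lt_length.mpr hex
        have hidx_app : pvIdx ((rest ++ sw) ++ [(name, icl)]) missing excl
            = pvIdx (rest ++ sw) missing excl := by
          unfold pvIdx
          rw [List.findIdx_append, if_pos hlt]
        rw [hstep, pvStitch_fail _ _ _ _ _ _ _ _ _ hM hscan,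
            List.append_assoc rest sw [(name, icl)]]
        rw [hq, hidx_cons] at hfa'
        refine ih fa' fb rest (sw ++ [(name, icl)]) missing seq excl prog0 L0
          ?_ ?_ ?_ ?_ ?_ hfb
        · rcases rest with _ | ⟨r, rest'⟩ <;> simp <;> omega
        · rw [← List.append_assoc]
          exact pvINV_rotate excl (name, icl) (rest ++ sw) missing (hq ▸ hinv)
        · intro h p hp
          rcases List.mem_append.mp hp with hp' | hp'
          · exact hsw h p hp'
          · rcases List.mem_singleton.mp hp' with rfl
            exact hhead
        · simp at hlen ⊢; omega
        · intro _
          rw [← List.append_assoc, hidx_app]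
          linarith
      · -- head buildable: both remove the atom and record (name, ic)
        obtain ⟨hname, hinv'⟩ := pvINV_erase excl name icl (rest ++ sw) missing (hq ▸ hinv)
        have hrem : PySem.List.remove? missing name = some (missing.erase name) :=
          PySem.List.remove?_eq_some_erase missing name hname
        have hstep : pvA_loop (fa' + 1) (((name, icl) :: rest) ++ sw) missing seq excl
            = pvA_loop fa' (rest ++ sw) (missing.erase name) (seq ++ [(name, ic)]) excl := by
          rw [hq]
          simp only [pvA_loop, if_neg hMlen, pvA_scan_eq_find?, hscan, hrem]
        rw [hstep, pvStitch_succ _ _ _ _ _ _ _ _ _ _ hM hscan, hrem, Option.getD_some]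
        have herase_len : (missing.erase name).length = missing.length - 1 :=
          List.length_erase_of_mem hname
        have hqlen : ((name, icl) :: (rest ++ sw)).length = missing.length :=
          pvINV_len excl _ _ (hq ▸ hinv)
        refine ih fa' fb rest sw (missing.erase name) (seq ++ [(name, ic)]) excl true L0
          ?_ hinv' (fun h => by cases h) (by simp at hlen ⊢; omega) ?_ ?_
        · rcases rest with _ | ⟨r, rest'⟩ <;> simp <;> omega
        · intro h'
          have hlen_q : (rest ++ sw).length = (missing.erase name).length :=
            pvINV_len excl _ _ hinv'
          have hex : ∃ p ∈ rest ++ sw, pvHas p (missing.erase name) excl = true :=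
            pvExists_buildable excl _ _ hinv' h'
          have hlt := List.findIdx_lt_length.mpr hex
          have hmul : missing.length * L0 = (missing.length - 1) * L0 + L0 := by
            obtain ⟨n, hn⟩ : ∃ n, missing.length = n + 1 := ⟨missing.length - 1, by omega⟩
            rw [hn]; simp [Nat.succ_mul]
          rw [hmul] at hfa'
          have hidx' : pvIdx (rest ++ sw) (missing.erase name) excl
              < (rest ++ sw).length := hlt
          rw [herase_len]
          have hL0 : missing.length ≤ L0 := by
            simp at hlen hqlen; omega
          have hstep2 : pvIdx (rest ++ sw) (missing.erase name) excl + 1 ≤ L0 := by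
            rw [hlen_q, herase_len] at hidx'
            omega
          linarith
        · intro h'
          have h1 : missing.length ≤ fb := le_trans (Nat.le_add_right _ _) hfb'
          rw [herase_len]
          simp
          omega

-- ===== VERDICT (by name: the statement is the Claim_ definition above) =====
theorem recur_find_build_seq_spec : Claim_equal_recur_find_build_seq := by
  intro rd M seq excl _ hpre
  unfold Spec_recur_find_build_seq recur_find_build_seq recur_find_build_seq_alt
  rcases hpre with rfl | ⟨h1, h2, h3, h4, h5⟩
  · simp [pvA_loop, pvB_loop]
  · by_cases hM : M = []
    · subst hM; simp [pvA_loop_nilM, pvB_loop_nilM]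
    · have hinv : pvINV excl rd M := by
        refine ⟨h1, h2, fun a => ⟨h3 a, h4 a⟩, ?_⟩
        intro S hS hsub
        have hmem : ∀ x, x ∈ M.filter (fun x => S.contains x) ↔ x ∈ S := by
          intro x
          simp only [List.mem_filter, List.contains_iff_mem]
          exact ⟨fun hx => hx.2, fun hx => ⟨hsub x hx, hx⟩⟩
        obtain ⟨x, hx⟩ := List.exists_mem_of_ne_nil S hS
        obtain ⟨p, hp, hp1, hp2⟩ := h5 (M.filter (fun x => S.contains x))
          (List.mem_sublists.mpr List.filter_sublist)
          (List.ne_nil_of_mem ((hmem x).mpr hx))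
        refine ⟨p, hp, (hmem p.1).mp hp1, ?_⟩
        rw [pvHas_congr p S (M.filter (fun x => S.contains x)) excl (fun y => (hmem y).symm)]
        exact hp2
      rw [pvB_loop_succ_stitch _ _ _ _ _ hM]
      have hfa : M ≠ [] →
          M.length * rd.length + pvIdx (rd ++ []) M excl + 2
            ≤ (M.length + 1) * (rd.length + 1) + 1 := by
        intro _
        simp only [List.append_nil]
        have hidx : pvIdx rd M excl ≤ rd.length := by
          simpa using (List.findIdx_le_length (p := fun p => pvHas p M excl) (xs := rd))
        have hexp : (M.length + 1) * (rd.length + 1) + 1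
            = M.length * rd.length + M.length + rd.length + 2 := by ring
        rw [hexp]
        linarith
      have hmain := pvMain (2 * ((M.length + 1) * (rd.length + 1) + 1) + 1)
        ((M.length + 1) * (rd.length + 1) + 1) M.length rd [] M seq excl false rd.length
        (by split <;> omega) (by simpa using hinv) (by simp) (by simp) hfa (by simp)
      simpa using hmain
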